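-- pv_equiv track=rewrite | github.com/cauan-sampaio/ESTD | removepar.py | removePar
-- ===== SOURCE A (Python) =====
-- def removePar(n):
--     if n < 10:
--         if n % 2:
--             return n
--         else:
--             return 0
--     else:
--         if (n % 10) % 2:
--             return n % 10 + 10 * removePar(n // 10)
--         else:
--             return removePar(n // 10)
-- ===== SOURCE B (Python) =====
-- def removePar(n):
--     if n < 10:
--         return n if n % 2 else 0
--     res, mul = 0, 1
--     while n >= 10:
--         d = n % 10
--         if d % 2:
--             res += d * mul
--             mul *= 10
--         n //= 10
--     if n % 2:
--         res += n * mul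
--     return res
-- ===== Notes on version B (the rewrite author's own statement) =====
-- stated objective: idiomatic
-- what changed: Replaces A's recursion (which rebuilds the number front-to-back on the way out of the call stack) with a single iterative while-loop that accumulates the kept odd digits back-to-front with an explicit place-value multiplier; A's single-digit guard is kept exactly.
import Mathlib
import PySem

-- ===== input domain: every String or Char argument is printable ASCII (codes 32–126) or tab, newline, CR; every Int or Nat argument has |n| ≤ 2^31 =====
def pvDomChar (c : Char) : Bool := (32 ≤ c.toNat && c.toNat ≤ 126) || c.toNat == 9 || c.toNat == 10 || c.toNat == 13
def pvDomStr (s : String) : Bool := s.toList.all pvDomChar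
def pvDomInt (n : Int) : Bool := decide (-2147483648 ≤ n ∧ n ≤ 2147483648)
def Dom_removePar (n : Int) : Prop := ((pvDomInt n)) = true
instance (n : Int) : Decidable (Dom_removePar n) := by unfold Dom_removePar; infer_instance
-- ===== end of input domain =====

-- ===== PORT A =====
-- ===== PORT A =====
-- A recursively strips even digits: the recursion builds the answer as digit + 10 * (rest).
def removePar (n : Int) : Int :=
  if h : n < 10 then
    if PySem.Int.mod n 2 ≠ 0 then n else 0
  else
    if PySem.Int.mod (PySem.Int.mod n 10) 2 ≠ 0 then
      PySem.Int.mod n 10 + 10 * removePar (PySem.Int.floordiv n 10)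
    else
      removePar (PySem.Int.floordiv n 10)
termination_by n.toNat
decreasing_by
  all_goals
    rw [PySem.Int.floordiv_eq_ediv_of_pos (by omega : (0:Int) < 10)]
    have hd := Int.ediv_add_emod n 10
    have hm := Int.emod_nonneg n (by omega : (10:Int) ≠ 0)
    have hm2 := Int.emod_lt_of_pos n (by omega : (0:Int) < 10)
    omega

-- ===== PORT B =====
-- B's while-loop: accumulate kept odd digits back-to-front with a place-value multiplier.
def removeParLoop (n res mul : Int) : Int :=
  if h : 10 ≤ n then
    if PySem.Int.mod (PySem.Int.mod n 10) 2 ≠ 0 then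
      removeParLoop (PySem.Int.floordiv n 10) (res + PySem.Int.mod n 10 * mul) (mul * 10)
    else
      removeParLoop (PySem.Int.floordiv n 10) res mul
  else
    if PySem.Int.mod n 2 ≠ 0 then res + n * mul else res
termination_by n.toNat
decreasing_by
  all_goals
    rw [PySem.Int.floordiv_eq_ediv_of_pos (by omega : (0:Int) < 10)]
    have hd := Int.ediv_add_emod n 10
    have hm := Int.emod_nonneg n (by omega : (10:Int) ≠ 0)
    have hm2 := Int.emod_lt_of_pos n (by omega : (0:Int) < 10)
    omega

def removePar_alt (n : Int) : Int :=
  if n < 10 then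
    if PySem.Int.mod n 2 ≠ 0 then n else 0
  else
    removeParLoop n 0 1

-- ===== PRECONDITION & SPEC =====
def Spec_removePar (n : Int) (out : Int) : Prop := out = removePar_alt n
instance (n : Int) (out : Int) : Decidable (Spec_removePar n out) := by unfold Spec_removePar; infer_instance

-- ===== CLAIM (what is proved, stated in full; the proofs are below) =====
def Claim_equal_removePar : Prop := ∀ (n : Int), Dom_removePar n → Spec_removePar n (removePar n)

-- ===== LEMMAS AND PROOFS =====
-- Loop invariant: the loop computes res + mul * removePar n.
theorem removeParLoop_eq (n res mul : Int) :
    removeParLoop n res mul = res + mul * removePar n := by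
  rw [removeParLoop, removePar]
  by_cases h : 10 ≤ n
  · rw [dif_pos h, dif_neg (show ¬ n < 10 by omega)]
    split
    · rw [removeParLoop_eq]; ring
    · rw [removeParLoop_eq]
  · rw [dif_neg h, dif_pos (show n < 10 by omega)]
    split
    · ring
    · ring
termination_by n.toNat
decreasing_by
  all_goals
    rw [PySem.Int.floordiv_eq_ediv_of_pos (by omega : (0:Int) < 10)]
    have hd := Int.ediv_add_emod n 10
    have hm := Int.emod_nonneg n (by omega : (10:Int) ≠ 0)
    have hm2 := Int.emod_lt_of_pos n (by omega : (0:Int) < 10)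
    omega

-- ===== VERDICT (by name: the statement is the Claim_ definition above) =====
theorem removePar_spec : Claim_equal_removePar := by
  intro n _
  unfold Spec_removePar removePar_alt
  by_cases h : n < 10
  · rw [removePar]
    simp [h]
  · rw [if_neg h, removeParLoop_eq, removePar]
    simp [h]
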